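-- pv_equiv track=rewrite | github.com/Faheemibrahim/daily_problems | track1_fundamentals/daily_warmup/warmup_day24.py | first_above
-- ===== SOURCE A (Python) =====
-- def first_above(arr, threshold):
--     lo, hi = 0, len(arr)
--     while lo < hi:
--         mid = (lo + hi) // 2
--         if arr[mid] <= threshold:
--             lo = mid + 1
--         else:
--             hi = mid
--     return lo if lo < len(arr) else -1
-- ===== SOURCE B (Python) =====
-- def first_above(arr, threshold):
--     # Recursive divide-and-conquer on sublists instead of an index-window loop:
--     # probe the middle element of the current sublist and recurse on a slice,
--     # carrying the absolute offset 'base'.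
--     def go(sub, base):
--         if not sub:
--             return base
--         m = len(sub) // 2
--         if sub[m] <= threshold:
--             return go(sub[m + 1:], base + m + 1)
--         return go(sub[:m], base)
--     idx = go(arr, 0)
--     return idx if idx < len(arr) else -1
-- ===== Notes on version B (the rewrite author's own statement) =====
-- stated objective: alternative
-- what changed: Replaces the in-place index-window while loop with a recursive divide-and-conquer on list slices carrying an absolute offset; since (lo+hi)//2 = lo+(hi-lo)//2, every probe hits the same element, so the result is identical even on unsorted input.
import Mathlib
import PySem

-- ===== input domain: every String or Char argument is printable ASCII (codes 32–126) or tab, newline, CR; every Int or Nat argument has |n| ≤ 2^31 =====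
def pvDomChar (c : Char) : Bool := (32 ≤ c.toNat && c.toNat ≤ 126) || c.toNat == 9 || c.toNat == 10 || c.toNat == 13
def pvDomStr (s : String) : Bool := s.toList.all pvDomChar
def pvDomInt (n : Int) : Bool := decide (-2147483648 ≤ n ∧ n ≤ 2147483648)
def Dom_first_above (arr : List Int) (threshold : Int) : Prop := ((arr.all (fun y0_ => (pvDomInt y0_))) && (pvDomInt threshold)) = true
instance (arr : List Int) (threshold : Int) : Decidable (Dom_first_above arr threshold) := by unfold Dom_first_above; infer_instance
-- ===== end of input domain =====

-- B replaces A's index-window while loop by recursion on list slices with an absolute offset; alternative decomposition, same results.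


-- ===== PORT A =====
-- the while loop; lo, hi kept as Nat (both stay in [0, arr.length], so Nat /2 = Python //2 and
-- arr[mid] is always in range: getD's default is never used on reachable calls)
def firstAboveLoopA (arr : List Int) (threshold : Int) (lo hi : Nat) : Nat :=
  if lo < hi then
    let mid := (lo + hi) / 2
    if arr.getD mid 0 ≤ threshold then firstAboveLoopA arr threshold (mid + 1) hi
    else firstAboveLoopA arr threshold lo mid
  else lo
termination_by hi - lo
decreasing_by all_goals omega

def first_above (arr : List Int) (threshold : Int) : Int :=
  let lo := firstAboveLoopA arr threshold 0 arr.length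
  if lo < arr.length then (lo : Int) else -1

-- ===== PORT B =====
-- recursion on the sublist; sub[m+1:] / sub[:m] with nonnegative in-range bounds are exactly drop/take
def firstAboveGoB (threshold : Int) (sub : List Int) (base : Nat) : Nat :=
  if h : sub.length = 0 then base
  else
    let m := sub.length / 2
    if sub.getD m 0 ≤ threshold then firstAboveGoB threshold (sub.drop (m + 1)) (base + m + 1)
    else firstAboveGoB threshold (sub.take m) base
termination_by sub.length
decreasing_by
  · simp only [List.length_drop]; omega
  · simp only [List.length_take]; omega

def first_above_alt (arr : List Int) (threshold : Int) : Int :=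
  let idx := firstAboveGoB threshold arr 0
  if idx < arr.length then (idx : Int) else -1

-- ===== PRECONDITION & SPEC =====
def Spec_first_above (arr : List Int) (threshold : Int) (out : Int) : Prop := out = first_above_alt arr threshold
instance (arr : List Int) (threshold : Int) (out : Int) : Decidable (Spec_first_above arr threshold out) := by unfold Spec_first_above; infer_instance

-- ===== CLAIM (what is proved, stated in full; the proofs are below) =====
def Claim_equal_first_above : Prop := ∀ (arr : List Int) (threshold : Int), Dom_first_above arr threshold → Spec_first_above arr threshold (first_above arr threshold)

-- ===== LEMMAS AND PROOFS =====
theorem goB_eq_loopA (arr : List Int) (threshold : Int) :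
    ∀ n lo hi, hi - lo = n → lo ≤ hi → hi ≤ arr.length →
      firstAboveGoB threshold ((arr.drop lo).take (hi - lo)) lo = firstAboveLoopA arr threshold lo hi := by
  intro n
  induction n using Nat.strong_induction_on with
  | _ n ih =>
    intro lo hi hn hle hhi
    by_cases h : lo < hi
    · have hlensub : ((arr.drop lo).take (hi - lo)).length = hi - lo := by
        simp [List.length_take, List.length_drop]; omega
      rw [firstAboveGoB, firstAboveLoopA]
      simp only [hlensub, if_pos h]
      rw [dif_neg (show ¬ (hi - lo = 0) by omega)]
      set m := (hi - lo) / 2 with hm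
      have hmid : (lo + hi) / 2 = lo + m := by omega
      have hmlt : m < hi - lo := by omega
      have hget : ((arr.drop lo).take (hi - lo)).getD m 0 = arr.getD (lo + m) 0 := by
        have h1 : lo + m < arr.length := by omega
        rw [List.getD_eq_getElem?_getD, List.getD_eq_getElem?_getD,
            List.getElem?_take_of_lt hmlt, List.getElem?_drop]
      rw [hget, hmid]
      by_cases hc : arr.getD (lo + m) 0 ≤ threshold
      · simp only [if_pos hc]
        have hd : ((arr.drop lo).take (hi - lo)).drop (m + 1)
            = (arr.drop (lo + (m + 1))).take (hi - (lo + m + 1)) := by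
          have e2 : hi - lo - (m + 1) = hi - (lo + m + 1) := by omega
          rw [List.drop_take, List.drop_drop, e2]
        rw [hd]
        have := ih (hi - (lo + m + 1)) (by omega) (lo + m + 1) hi (by omega) (by omega) hhi
        simpa [Nat.add_assoc] using this
      · simp only [if_neg hc]
        have ht : ((arr.drop lo).take (hi - lo)).take m = (arr.drop lo).take ((lo + m) - lo) := by
          rw [List.take_take]
          congr 1
          omega
        rw [ht]
        exact ih m (by omega) lo (lo + m) (by omega) (by omega) (by omega)
    · have hlo : hi = lo := by omega
      subst hlo
      rw [firstAboveGoB, firstAboveLoopA]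
      simp
  
theorem goB_top (arr : List Int) (threshold : Int) :
    firstAboveGoB threshold arr 0 = firstAboveLoopA arr threshold 0 arr.length := by
  have := goB_eq_loopA arr threshold arr.length 0 arr.length (by omega) (by omega) (le_refl _)
  simpa using this

-- ===== VERDICT (by name: the statement is the Claim_ definition above) =====
theorem first_above_spec : Claim_equal_first_above := by
  intro arr threshold _
  unfold Spec_first_above first_above first_above_alt
  rw [goB_top]
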